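-- pv_equiv track=rewrite | github.com/harrimand/pySnips | qm.py | mkSortByNumBitsSetDict
-- ===== SOURCE A (Python) =====
-- def mkSortByNumBitsSetDict(binData):
--     """Take a list of binary strings and return a dictionary sorted by
--     number of bits set in the strings.  Keys indicate number of bits set
--     in each of the binary strings and values are lists of binary strings"""
--     bDict = {}
--     bitsize = len(binData[0])
--     for i in range(bitsize + 1):
--         bTemp = []
--         for v in binData:
--            if i == v.count("1"):
--                 bTemp.append(v)
--         if len(bTemp):
--             bDict[i] = bTemp
--     return bDict
-- ===== SOURCE B (Python) =====
-- def mkSortByNumBitsSetDict(binData):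
--     """Group the strings by how many '1' characters each contains and
--     return a dict whose keys (the set-bit counts) are in ascending order."""
--     groups = {}
--     for v in binData:
--         groups.setdefault(v.count("1"), []).append(v)
--     return dict(sorted(groups.items(), key=lambda kv: kv[0]))
-- ===== Notes on version B (the rewrite author's own statement) =====
-- stated objective: faster
-- what changed: A rescans the whole input once for every candidate bit count 0..len(binData[0]); B makes a single bucketing pass into a dict keyed by each string's '1'-count and then sorts the few (key, bucket) items by key; intended as faster (measured ~2.3x median at the largest size, though not confirmed consistently in a timing run).
-- intended difference: On lists where some string contains more '1's than len(binData[0]) (only possible with unequal-length strings), A silently drops those strings because its key range stops at len(binData[0]); B groups every string, which is the intended grouping. — e.g. on mkSortByNumBitsSetDict(["0", "11"]): A returns [(0, ["0"])], B returns [(0, ["0"]), (2, ["11"])]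
import Mathlib
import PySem

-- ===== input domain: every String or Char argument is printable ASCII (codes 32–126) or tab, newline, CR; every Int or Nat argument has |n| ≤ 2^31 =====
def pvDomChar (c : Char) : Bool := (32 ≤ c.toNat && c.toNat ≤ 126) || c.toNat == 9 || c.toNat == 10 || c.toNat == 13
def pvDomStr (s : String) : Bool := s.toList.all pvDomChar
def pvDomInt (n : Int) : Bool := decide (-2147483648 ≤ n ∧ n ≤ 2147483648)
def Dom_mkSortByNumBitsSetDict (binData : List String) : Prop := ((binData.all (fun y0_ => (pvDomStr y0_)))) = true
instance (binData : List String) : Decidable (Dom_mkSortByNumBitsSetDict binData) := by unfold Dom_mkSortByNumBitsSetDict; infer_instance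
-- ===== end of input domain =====

-- B replaces A's scan-per-candidate-key (one pass over the data for every i in 0..len(binData[0]))
-- by a single bucketing pass into a dict followed by a sort of the (key, bucket) items by key
-- (intended as faster; a timing run measured ~2.3x median at the largest size, not consistently).

-- ===== PORT A =====
def mkSortByNumBitsSetDict (binData : List String) : List (Int × List String) :=
  let bitsize : Int := PySem.Str.len (binData.headD "")
  ((PySem.List.pyRange 0 (bitsize + 1) 1).foldl
    (fun bDict i =>
      let bTemp := binData.foldl
        (fun acc v => if i == (PySem.Str.count v "1" : Int) then acc ++ [v] else acc) []
      if bTemp.length ≠ 0 then bDict.insert i bTemp else bDict)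
    PySem.Dict.empty).items

-- ===== PORT B =====
def mkSortByNumBitsSetDict_alt (binData : List String) : List (Int × List String) :=
  let groups := binData.foldl
    (fun (d : PySem.Dict Int (List String)) v =>
      d.modify (PySem.Str.count v "1" : Int) [] (· ++ [v]))
    PySem.Dict.empty
  PySem.List.sorted groups.items (fun kv => kv.1) false

-- ===== PRECONDITION & SPEC =====
-- Pre_ excludes only the empty list, on which A raises IndexError at binData[0].
def Pre_mkSortByNumBitsSetDict (binData : List String) : Prop := binData ≠ []
instance (binData : List String) : Decidable (Pre_mkSortByNumBitsSetDict binData) := by unfold Pre_mkSortByNumBitsSetDict; infer_instance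
def pvWitness_mkSortByNumBitsSetDict : List String := ["01", "11", "00"]

-- On lists where some string contains more '1's than len(binData[0]) (only possible with
-- unequal-length strings), A silently drops those strings because its key range stops at
-- len(binData[0]); B groups every string, which is the intended grouping.
def D_mkSortByNumBitsSetDict (binData : List String) : Prop :=
  ∃ v ∈ binData, ((binData.headD "").toList.length : Int) < (v.toList.count '1' : Int)
instance (binData : List String) : Decidable (D_mkSortByNumBitsSetDict binData) := by unfold D_mkSortByNumBitsSetDict; infer_instance

def Spec_mkSortByNumBitsSetDict (binData : List String) (out : List (Int × List String)) : Prop := ¬ D_mkSortByNumBitsSetDict binData → out = mkSortByNumBitsSetDict_alt binData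
instance (binData : List String) (out : List (Int × List String)) : Decidable (Spec_mkSortByNumBitsSetDict binData out) := by unfold Spec_mkSortByNumBitsSetDict; infer_instance

def pvDiffWitness_mkSortByNumBitsSetDict : List String := ["0", "11"]
def pvDiffWitnessOut_mkSortByNumBitsSetDict : (List (Int × List String)) × (List (Int × List String)) :=
  ([(0, ["0"])], [(0, ["0"]), (2, ["11"])])

-- ===== CLAIM (what is proved, stated in full; the proofs are below) =====
def Claim_unchanged_mkSortByNumBitsSetDict : Prop := ∀ (binData : List String), Dom_mkSortByNumBitsSetDict binData → Pre_mkSortByNumBitsSetDict binData → Spec_mkSortByNumBitsSetDict binData (mkSortByNumBitsSetDict binData)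
def Claim_changed_mkSortByNumBitsSetDict : Prop := Dom_mkSortByNumBitsSetDict (pvDiffWitness_mkSortByNumBitsSetDict) ∧ Pre_mkSortByNumBitsSetDict (pvDiffWitness_mkSortByNumBitsSetDict) ∧ D_mkSortByNumBitsSetDict (pvDiffWitness_mkSortByNumBitsSetDict) ∧ mkSortByNumBitsSetDict (pvDiffWitness_mkSortByNumBitsSetDict) = pvDiffWitnessOut_mkSortByNumBitsSetDict.1 ∧ mkSortByNumBitsSetDict_alt (pvDiffWitness_mkSortByNumBitsSetDict) = pvDiffWitnessOut_mkSortByNumBitsSetDict.2 ∧ pvDiffWitnessOut_mkSortByNumBitsSetDict.1 ≠ pvDiffWitnessOut_mkSortByNumBitsSetDict.2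

-- ===== LEMMAS AND PROOFS =====

-- the '1'-count of a string, as the Int both ports compare on
def pvCnt (v : String) : Int := (PySem.Str.count v "1" : Int)

-- PySem.Str.count of the one-character needle "1" is the plain character count (fuel-indexed
-- occurrence scan = List.count when the needle is a single character)
lemma pvCountGoSingle (c : Char) (l : List Char) (fuel acc : Nat) (h : l.length ≤ fuel) :
    PySem.Chars.count.go [c] fuel l acc = acc + l.count c := by
  induction l generalizing fuel acc with
  | nil => cases fuel <;> simp [PySem.Chars.count.go]
  | cons x t ih =>
    cases fuel with
    | zero => simp at h
    | succ f =>
      rw [PySem.Chars.count.go]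
      by_cases hx : x = c
      · subst hx
        simp only [List.isPrefixOf, BEq.rfl, Bool.true_and, if_true,
          List.length_singleton, List.drop_one, List.tail_cons]
        rw [ih f (acc + 1) (by simpa using h)]
        simp
        omega
      · have hcx : ¬ c = x := fun he => hx he.symm
        have : [c].isPrefixOf (x :: t) = false := by
          simp [List.isPrefixOf]; exact hcx
        rw [this]
        simp only [Bool.false_eq_true, if_false]
        rw [ih f acc (by simpa using h)]
        simp [List.count_cons]
        exact hx

lemma pvCnt_eq_count (v : String) : pvCnt v = (v.toList.count '1' : Int) := by
  have : PySem.Str.count v "1" = v.toList.count '1' := by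
    simp [PySem.Str.count_eq, PySem.Chars.count, pvCountGoSingle]
  rw [pvCnt, this]

lemma pvLen_eq (v : String) : PySem.Str.len v = (v.toList.length : Int) := by
  simp [PySem.Str.len]

-- A's result, in closed form: ascending candidate keys, each with its (nonempty) filter group
def pvLA (binData : List String) (n : Int) : List (Int × List String) :=
  ((PySem.List.pyRange 0 (n + 1) 1).filter
      (fun i => (binData.filter (fun v => i == pvCnt v)).length ≠ 0)).map
    (fun i => (i, binData.filter (fun v => i == pvCnt v)))

lemma portA_eq (binData : List String) :
    mkSortByNumBitsSetDict binData = pvLA binData (PySem.Str.len (binData.headD "")) := by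
  unfold mkSortByNumBitsSetDict pvLA
  dsimp only
  set n := PySem.Str.len (binData.headD "") with hn
  have h1 : (PySem.List.pyRange 0 (n + 1) 1).foldl
      (fun (bDict : PySem.Dict Int (List String)) i =>
        let bTemp := binData.foldl
          (fun acc v => if i == (PySem.Str.count v "1" : Int) then acc ++ [v] else acc) []
        if bTemp.length ≠ 0 then bDict.insert i bTemp else bDict)
      PySem.Dict.empty =
      (PySem.List.pyRange 0 (n + 1) 1).foldl
      (fun (bDict : PySem.Dict Int (List String)) i =>
        if (binData.filter (fun v => i == pvCnt v)).length ≠ 0 then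
          bDict.insert i (binData.filter (fun v => i == pvCnt v)) else bDict)
      PySem.Dict.empty := by
    apply PySem.List.foldl_congr_mem
    intro d i _
    simp only [PySem.List.foldl_append_if_eq_filter, List.nil_append, pvCnt]
  rw [h1, PySem.List.foldl_ite_eq_foldl_filter]
  rw [PySem.Dict.items_foldl_insert_fresh (k := fun i => i)
        (v := fun i => binData.filter (fun v => i == pvCnt v))]
  · rfl
  · intro a _; exact PySem.Dict.contains_empty a
  · simp only [List.map_id']
    exact (PySem.List.nodup_pyRange_one 0 (n+1)).filter _

lemma portB_eq (binData : List String) (n : Int)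
    (H : ∀ v ∈ binData, pvCnt v ≤ n) :
    mkSortByNumBitsSetDict_alt binData = pvLA binData n := by
  unfold mkSortByNumBitsSetDict_alt
  dsimp only
  set G := binData.foldl (fun (d : PySem.Dict Int (List String)) v => d.modify (PySem.Str.count v "1" : Int) [] (· ++ [v])) PySem.Dict.empty with hG
  have hG' : G = binData.foldl (fun (d : PySem.Dict Int (List String)) v => d.modify (pvCnt v) [] (· ++ [v])) PySem.Dict.empty := by
    rw [hG]; rfl
  have hnodup : G.keys.Nodup := by
    rw [hG']
    apply PySem.Dict.nodup_keys_foldl_modify_key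
    simp [PySem.Dict.empty]
  have hkeys : G.keys = PySem.Set.ofList (binData.map pvCnt) := by
    rw [hG', PySem.Dict.keys_foldl_modify_key]
    simp [PySem.Set.update, PySem.Set.ofList_eq_foldl, PySem.Dict.empty]
  have hgetD : ∀ c, G.getD c [] = binData.filter (fun v => pvCnt v == c) := by
    intro c
    rw [hG', show binData.foldl (fun (d : PySem.Dict Int (List String)) v => d.modify (pvCnt v) [] (· ++ [v])) PySem.Dict.empty
        = (binData.map (fun v => (pvCnt v, v))).foldl (fun d p => d.modify p.1 [] (· ++ [p.2])) PySem.Dict.empty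
      from (List.foldl_map (f := fun v => (pvCnt v, v)) (g := fun (d : PySem.Dict Int (List String)) p => d.modify p.1 [] (· ++ [p.2])) (l := binData) (init := PySem.Dict.empty)).symm]
    rw [PySem.Dict.getD_foldl_modify_append]
    simp [List.filter_map, List.map_map, Function.comp_def]
  have hitems : G.items = G.keys.map (fun k => (k, G.getD k [])) :=
    PySem.Dict.items_eq_map_keys G hnodup []
  have hfil : ∀ k : Int, G.getD k [] = binData.filter (fun v => k == pvCnt v) := by
    intro k
    rw [hgetD k]
    apply List.filter_congr
    intro v _
    by_cases h : pvCnt v = k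
    · subst h; simp
    · rw [beq_eq_false_iff_ne.mpr h, beq_eq_false_iff_ne.mpr (Ne.symm h)]
  apply PySem.List.sorted_eq_of_perm_of_pairwise_lt
  · -- (pvLA binData n).Perm G.items
    rw [(List.perm_ext_iff_of_nodup ?nd1 ?nd2)]
    case nd1 =>
      apply List.Nodup.map
      · intro a b hab; exact congrArg Prod.fst hab
      · exact (PySem.List.nodup_pyRange_one 0 (n+1)).filter _
    case nd2 =>
      rw [hitems]
      apply List.Nodup.map
      · intro a b hab; exact congrArg Prod.fst hab
      · exact hnodup
    rintro ⟨k, g⟩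
    rw [hitems, hkeys]
    simp only [pvLA, List.mem_map, List.mem_filter, PySem.Set.mem_ofList, List.mem_map]
    constructor
    · rintro ⟨i, ⟨hir, hne⟩, heq⟩
      have hg : (List.filter (fun v => i == pvCnt v) binData) = g := congrArg Prod.snd heq
      have hk : i = k := congrArg Prod.fst heq
      subst hk
      simp only [decide_eq_true_eq] at hne
      obtain ⟨v, hv, hvi⟩ : ∃ v ∈ binData, (i == pvCnt v) = true := by
        by_contra hc
        push Not at hc
        have hnil : List.filter (fun v => i == pvCnt v) binData = [] :=
          List.filter_eq_nil_iff.mpr (by intro x hx; simpa using hc x hx)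
        rw [hnil] at hne; simp at hne
      refine ⟨i, ⟨v, hv, (beq_iff_eq.mp hvi).symm⟩, ?_⟩
      rw [hfil i, hg]
    · rintro ⟨k', ⟨v, hv, hvk⟩, heq⟩
      have hg : G.getD k' [] = g := congrArg Prod.snd heq
      have hk : k' = k := congrArg Prod.fst heq
      subst hk
      have hkn : k' ≤ n := hvk ▸ H v hv
      have hk0 : 0 ≤ k' := hvk ▸ Int.natCast_nonneg _
      refine ⟨k', ⟨?_, ?_⟩, ?_⟩
      · rw [PySem.List.mem_pyRange_one]; omega
      · simp only [decide_eq_true_eq]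
        intro hlen
        have : v ∈ List.filter (fun v => k' == pvCnt v) binData :=
          List.mem_filter.mpr ⟨hv, beq_iff_eq.mpr hvk.symm⟩
        rw [List.length_eq_zero_iff.mp hlen] at this
        simp at this
      · rw [← hfil k', hg]
  · -- pairwise lt
    unfold pvLA
    rw [List.pairwise_map]
    exact ((PySem.List.pairwise_lt_pyRange_one 0 (n+1)).filter _)

-- ===== VERDICT (by name: the statement is the Claim_ definition above) =====
theorem mkSortByNumBitsSetDict_spec : Claim_unchanged_mkSortByNumBitsSetDict := by
  intro binData _ _
  unfold Spec_mkSortByNumBitsSetDict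
  intro hnd
  unfold D_mkSortByNumBitsSetDict at hnd
  push Not at hnd
  rw [portA_eq, portB_eq binData (PySem.Str.len (binData.headD ""))]
  intro v hv
  rw [pvCnt_eq_count, pvLen_eq]
  exact hnd v hv

theorem mkSortByNumBitsSetDict_changed : Claim_changed_mkSortByNumBitsSetDict := by
  unfold Claim_changed_mkSortByNumBitsSetDict; decide
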